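-- pv_equiv track=rewrite | github.com/pypi-data/pypi-mirror-383 | packages/bdd-lint/bdd_lint-0.1.0.tar.gz/bdd_lint-0.1.0/bdd_lint/rules/consistent_step_keyword_order_rule.py | check
-- ===== SOURCE A (Python) =====
-- def check(scenario):
--     issues = []
--     steps = scenario.get('steps', [])
--     order = ['given', 'when', 'then']
--     found = []
--     for step in steps:
--         for keyword in order:
--             if step.strip().lower().startswith(keyword):
--                 found.append(keyword)
--     if found != sorted(found, key=lambda x: order.index(x)):
--         issues.append(f"Step keywords are out of order: {found}")
--     return issues
-- ===== SOURCE B (Python) =====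
-- def check(scenario):
--     order = ['given', 'when', 'then']
--     found = []
--     prev = -1
--     ok = True
--     for step in scenario.get('steps', []):
--         s = step.strip().lower()
--         for i, kw in enumerate(order):
--             if s.startswith(kw):
--                 found.append(kw)
--                 if i < prev:
--                     ok = False
--                 prev = i
--     if ok:
--         return []
--     return ["Step keywords are out of order: " + str(found)]
-- ===== Notes on version B (the rewrite author's own statement) =====
-- stated objective: simpler
-- what changed: Replaces the sort-and-compare disorder test (found != sorted(found, key=order.index)) with an out-of-order flag maintained by a monotonicity scan fused into the keyword-collecting loop, so no sorted copy, no key lambda and no second pass over found are needed.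
import Mathlib
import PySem

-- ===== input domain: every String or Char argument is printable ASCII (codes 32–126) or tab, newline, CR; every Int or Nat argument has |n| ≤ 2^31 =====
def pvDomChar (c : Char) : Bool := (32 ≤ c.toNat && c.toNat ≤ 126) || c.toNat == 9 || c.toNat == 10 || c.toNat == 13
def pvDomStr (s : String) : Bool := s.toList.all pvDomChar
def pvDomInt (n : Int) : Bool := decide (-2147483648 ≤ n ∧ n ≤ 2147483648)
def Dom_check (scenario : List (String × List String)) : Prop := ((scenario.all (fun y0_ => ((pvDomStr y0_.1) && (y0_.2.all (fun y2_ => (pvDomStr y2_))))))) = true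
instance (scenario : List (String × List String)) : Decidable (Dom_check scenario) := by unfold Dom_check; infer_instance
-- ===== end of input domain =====

-- B replaces A's sort-and-compare disorder test with a monotonicity scan fused into the
-- keyword-collecting loop (objective: simpler; no sort, one pass over the steps).

-- str(xs) for a Python list of strings; exact when the elements contain no quote or
-- backslash (here they are always 'given'/'when'/'then').
def pyStrList (xs : List String) : String :=
  PySem.Str.join "" ["[", PySem.Str.join ", " (xs.map (fun k => PySem.Str.join "" ["'", k, "'"])), "]"]

-- ===== PORT A =====
def check (scenario : List (String × List String)) : List String :=
  let issues : List String := []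
  let steps := PySem.Dict.getD ⟨scenario⟩ "steps" []
  let order : List String := ["given", "when", "then"]
  let found := steps.foldl (fun acc step =>
      order.foldl (fun acc kw =>
        if PySem.Str.startswith (PySem.Str.lower (PySem.Str.strip step)) kw then acc ++ [kw]
        else acc) acc)
    []
  -- key = order.index(x): found's elements are always members of order, so `.getD 0` is exact
  let issues := if found ≠ PySem.List.sorted found (fun x => (((PySem.List.index? order x).getD 0 : Nat) : Int))
    then issues ++ [PySem.Str.join "" ["Step keywords are out of order: ", pyStrList found]]
    else issues
  issues

-- ===== PORT B =====
def check_alt (scenario : List (String × List String)) : List String :=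
  let order : List String := ["given", "when", "then"]
  let st := (PySem.Dict.getD ⟨scenario⟩ "steps" []).foldl
    (fun (st : List String × Int × Bool) step =>
      let s := PySem.Str.lower (PySem.Str.strip step)
      (PySem.List.enumerate order).foldl
        (fun (st : List String × Int × Bool) ik =>
          if PySem.Str.startswith s ik.2 then
            (st.1 ++ [ik.2], ik.1, if ik.1 < st.2.1 then false else st.2.2)
          else st)
        st)
    ([], -1, true)
  if st.2.2 then []
  else [PySem.Str.join "" ["Step keywords are out of order: ", pyStrList st.1]]

-- ===== PRECONDITION & SPEC =====
def Spec_check (scenario : List (String × List String)) (out : List String) : Prop := out = check_alt scenario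
instance (scenario : List (String × List String)) (out : List String) : Decidable (Spec_check scenario out) := by unfold Spec_check; infer_instance

-- ===== CLAIM (what is proved, stated in full; the proofs are below) =====
def Claim_equal_check : Prop := ∀ (scenario : List (String × List String)), Dom_check scenario → Spec_check scenario (check scenario)

-- ===== LEMMAS AND PROOFS =====

-- the match test, per-step matched keywords, and the sort key of A
def pvP (step kw : String) : Bool := PySem.Str.startswith (PySem.Str.lower (PySem.Str.strip step)) kw
def pvM (step : String) : List String := (["given", "when", "then"] : List String).filter (pvP step)
def pvRank (x : String) : Int := (((PySem.List.index? ["given", "when", "then"] x).getD 0 : Nat) : Int)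
def pvMsg (F : List String) : String := PySem.Str.join "" ["Step keywords are out of order: ", pyStrList F]

-- B's monotonicity flag, as a function of the rank sequence
def pvMono (pr : Int) : List Int → Bool
  | [] => true
  | r :: rs => (decide (pr ≤ r)) && pvMono r rs

def pvLastD (rs : List Int) (pr : Int) : Int := rs.foldl (fun _ r => r) pr

theorem pvMono_append (l1 l2 : List Int) : ∀ pr, pvMono pr (l1 ++ l2) = (pvMono pr l1 && pvMono (pvLastD l1 pr) l2) := by
  induction l1 with
  | nil => intro pr; simp [pvMono, pvLastD]
  | cons r t ih => intro pr; simp [pvMono, pvLastD, ih r, Bool.and_assoc, pvLastD]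

theorem pvLastD_append (l1 l2 : List Int) (pr : Int) : pvLastD (l1 ++ l2) pr = pvLastD l2 (pvLastD l1 pr) := by
  simp [pvLastD, List.foldl_append]

theorem pvMono_iff_pairwise (rs : List Int) : ∀ r, pvMono r rs = true ↔ List.Pairwise (· ≤ ·) (r :: rs) := by
  induction rs with
  | nil => intro r; simp [pvMono]
  | cons a t ih =>
    intro r
    simp only [pvMono, Bool.and_eq_true, decide_eq_true_eq, ih a, List.pairwise_cons]
    constructor
    · rintro ⟨hra, h1, h2⟩
      refine ⟨?_, h1, h2⟩
      intro y hy
      rcases List.mem_cons.mp hy with h | h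
      · exact h ▸ hra
      · exact le_trans hra (h1 y h)
    · rintro ⟨h0, h1, h2⟩
      exact ⟨h0 a (by simp), h1, h2⟩

-- A's found list, named
def pvFoundA (steps : List String) : List String :=
  steps.foldl (fun acc step =>
    (["given", "when", "then"] : List String).foldl (fun acc kw =>
      if PySem.Str.startswith (PySem.Str.lower (PySem.Str.strip step)) kw then acc ++ [kw]
      else acc) acc) []

theorem pvFoundA_eq (steps : List String) : pvFoundA steps = steps.flatMap pvM := by
  unfold pvFoundA
  calc steps.foldl (fun acc step =>
        (["given", "when", "then"] : List String).foldl (fun acc kw =>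
          if PySem.Str.startswith (PySem.Str.lower (PySem.Str.strip step)) kw then acc ++ [kw]
          else acc) acc) []
      = steps.foldl (fun acc step => acc ++ pvM step) [] := by
        apply PySem.List.foldl_congr_mem
        intro acc step _
        exact PySem.List.foldl_append_if_eq_filter (pvP step) _ _
    _ = steps.flatMap pvM := by
        simpa using PySem.List.foldl_append_eq_flatMap pvM steps []

-- B's inner (per-step) loop
def pvInner (s : String) (st : List String × Int × Bool) : List String × Int × Bool :=
  (PySem.List.enumerate (["given", "when", "then"] : List String)).foldl
    (fun (st : List String × Int × Bool) ik =>
      if PySem.Str.startswith s ik.2 then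
        (st.1 ++ [ik.2], ik.1, if ik.1 < st.2.1 then false else st.2.2)
      else st)
    st

theorem pvInner_eq (step : String) (f : List String) (pr : Int) (ok : Bool) :
    pvInner (PySem.Str.lower (PySem.Str.strip step)) (f, pr, ok) =
      (f ++ pvM step, pvLastD ((pvM step).map pvRank) pr,
       ok && pvMono pr ((pvM step).map pvRank)) := by
  have henum : PySem.List.enumerate (["given", "when", "then"] : List String) =
      [(0, "given"), (1, "when"), (2, "then")] := by decide
  have hr0 : pvRank "given" = 0 := by decide
  have hr1 : pvRank "when" = 1 := by decide
  have hr2 : pvRank "then" = 2 := by decide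
  unfold pvInner pvM pvP
  rw [henum]
  cases h0 : PySem.Str.startswith (PySem.Str.lower (PySem.Str.strip step)) "given" <;>
  cases h1 : PySem.Str.startswith (PySem.Str.lower (PySem.Str.strip step)) "when" <;>
  cases h2 : PySem.Str.startswith (PySem.Str.lower (PySem.Str.strip step)) "then" <;>
    simp only [List.foldl_cons, List.foldl_nil, List.filter, h0, h1, h2, if_true, if_false,
      Bool.false_eq_true, List.map_cons, List.map_nil, hr0, hr1, hr2, pvMono, pvLastD,
      List.foldl] <;>
    (try split_ifs) <;> rcases ok <;> simp_all

theorem pvOuter_eq (steps : List String) : ∀ (f : List String) (pr : Int) (ok : Bool),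
    steps.foldl (fun (st : List String × Int × Bool) step =>
        pvInner (PySem.Str.lower (PySem.Str.strip step)) st) (f, pr, ok) =
      (f ++ steps.flatMap pvM, pvLastD ((steps.flatMap pvM).map pvRank) pr,
       ok && pvMono pr ((steps.flatMap pvM).map pvRank)) := by
  induction steps with
  | nil => intro f pr ok; simp [pvLastD, pvMono]
  | cons s t ih =>
    intro f pr ok
    rw [List.foldl_cons, pvInner_eq, ih]
    simp [List.map_append, pvMono_append, pvLastD_append, Bool.and_assoc]

-- the two disorder tests agree
theorem pvSorted_iff (F : List String) :
    F = PySem.List.sorted F pvRank ↔ List.Pairwise (fun a b => pvRank a ≤ pvRank b) F := by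
  constructor
  · intro h; rw [h]; exact PySem.List.sorted_pairwise F pvRank
  · intro h; exact (PySem.List.sorted_eq_self_of_pairwise F pvRank h).symm

theorem pvMono_neg_one (F : List String) :
    pvMono (-1) (F.map pvRank) = true ↔ List.Pairwise (fun a b => pvRank a ≤ pvRank b) F := by
  rw [pvMono_iff_pairwise (F.map pvRank) (-1), List.pairwise_cons, List.pairwise_map]
  constructor
  · exact fun h => h.2
  · intro h
    refine ⟨?_, h⟩
    intro y hy
    rcases List.mem_map.mp hy with ⟨x, -, rfl⟩
    have : (0 : Int) ≤ pvRank x := by simp [pvRank]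
    omega

theorem checkA_eq (scenario : List (String × List String)) :
    check scenario =
      (if pvFoundA (PySem.Dict.getD ⟨scenario⟩ "steps" []) =
          PySem.List.sorted (pvFoundA (PySem.Dict.getD ⟨scenario⟩ "steps" [])) pvRank
       then [] else [pvMsg (pvFoundA (PySem.Dict.getD ⟨scenario⟩ "steps" []))]) := by
  show (if pvFoundA (PySem.Dict.getD ⟨scenario⟩ "steps" []) ≠
          PySem.List.sorted (pvFoundA (PySem.Dict.getD ⟨scenario⟩ "steps" [])) pvRank
        then [] ++ [pvMsg (pvFoundA (PySem.Dict.getD ⟨scenario⟩ "steps" []))] else []) = _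
  by_cases h : pvFoundA (PySem.Dict.getD ⟨scenario⟩ "steps" []) =
      PySem.List.sorted (pvFoundA (PySem.Dict.getD ⟨scenario⟩ "steps" [])) pvRank
  · rw [if_neg (not_not_intro h), if_pos h]
  · rw [if_pos h, if_neg h, List.nil_append]

theorem checkB_eq (scenario : List (String × List String)) :
    check_alt scenario =
      (if List.Pairwise (fun a b => pvRank a ≤ pvRank b)
          ((PySem.Dict.getD ⟨scenario⟩ "steps" []).flatMap pvM)
       then []
       else [pvMsg ((PySem.Dict.getD ⟨scenario⟩ "steps" []).flatMap pvM)]) := by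
  show (if ((PySem.Dict.getD ⟨scenario⟩ "steps" []).foldl
          (fun (st : List String × Int × Bool) step =>
            pvInner (PySem.Str.lower (PySem.Str.strip step)) st) ([], -1, true)).2.2
        then []
        else [pvMsg (((PySem.Dict.getD ⟨scenario⟩ "steps" []).foldl
          (fun (st : List String × Int × Bool) step =>
            pvInner (PySem.Str.lower (PySem.Str.strip step)) st) ([], -1, true)).1)]) = _
  rw [pvOuter_eq]
  simp only [List.nil_append, Bool.true_and]
  by_cases h : List.Pairwise (fun a b => pvRank a ≤ pvRank b)
      ((PySem.Dict.getD ⟨scenario⟩ "steps" []).flatMap pvM)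
  · rw [if_pos ((pvMono_neg_one _).mpr h), if_pos h]
  · rw [if_neg (fun hc => h ((pvMono_neg_one _).mp hc)), if_neg h]

-- ===== VERDICT (by name: the statement is the Claim_ definition above) =====
theorem check_spec : Claim_equal_check := by
  intro scenario _
  unfold Spec_check
  rw [checkA_eq, checkB_eq, pvFoundA_eq]
  by_cases hp : List.Pairwise (fun a b => pvRank a ≤ pvRank b)
      ((PySem.Dict.getD ⟨scenario⟩ "steps" []).flatMap pvM)
  · rw [if_pos ((pvSorted_iff _).mpr hp), if_pos hp]
  · rw [if_neg (fun hc => hp ((pvSorted_iff _).mp hc)), if_neg hp]
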